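-- pv_equiv track=rewrite | github.com/WamesM/iEnhancer-DCLA | first/first_sequence.py | sentence2word
-- ===== SOURCE A (Python) =====
-- def sentence2word(str_set):
--     word_seq = []
--     for sr in str_set:
--         tmp = []
--         for i in range(len(sr)-6):
--             if('N' in sr[i:i+7]):
--                 tmp.append('null')
--             else:
--                 tmp.append(sr[i:i+7])
--         word_seq.append(' '.join(tmp))
--     return word_seq
-- ===== SOURCE B (Python) =====
-- def sentence2word(str_set):
--     word_seq = []
--     for sr in str_set:
--         tmp = []
--         last_n = -1
--         for j, c in enumerate(sr):
--             if c == 'N':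
--                 last_n = j
--             if j >= 6:
--                 i = j - 6
--                 tmp.append('null' if i <= last_n else sr[i:i + 7])
--         word_seq.append(' '.join(tmp))
--     return word_seq
-- ===== Notes on version B (the rewrite author's own statement) =====
-- stated objective: alternative
-- what changed: Replaces the per-window slice-and-membership scan with a single left-to-right pass that tracks the index of the most recent 'N', deciding each window by one integer comparison.
import Mathlib
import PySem

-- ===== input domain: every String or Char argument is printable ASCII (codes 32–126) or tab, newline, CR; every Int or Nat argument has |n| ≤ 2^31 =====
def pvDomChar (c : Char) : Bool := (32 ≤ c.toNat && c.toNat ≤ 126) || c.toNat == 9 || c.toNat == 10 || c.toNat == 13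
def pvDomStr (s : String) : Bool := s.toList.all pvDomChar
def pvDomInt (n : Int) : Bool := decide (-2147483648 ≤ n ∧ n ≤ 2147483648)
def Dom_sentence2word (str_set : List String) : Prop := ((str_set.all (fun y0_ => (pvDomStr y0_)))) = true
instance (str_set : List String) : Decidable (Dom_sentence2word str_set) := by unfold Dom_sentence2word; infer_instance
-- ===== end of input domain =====

-- B replaces A's per-window slice-membership scan by a one-pass loop tracking the index of
-- the most recent 'N' (alternative decomposition; each window decided by one integer comparison).

-- ===== PORT A =====
def sentence2word (str_set : List String) : List String :=
  str_set.foldl (fun word_seq sr =>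
    let cs := sr.toList
    let tmp := (PySem.List.pyRange 0 ((cs.length : Int) - 6) 1).foldl
      (fun tmp i =>
        if PySem.Chars.isIn ['N'] (PySem.List.slice cs (some i) (some (i + 7))) then
          tmp ++ [['n','u','l','l']]
        else
          tmp ++ [PySem.List.slice cs (some i) (some (i + 7))]) []
    word_seq ++ [String.ofList (PySem.Chars.join [' '] tmp)]) []

-- ===== PORT B =====
def sentence2word_alt (str_set : List String) : List String :=
  str_set.foldl (fun word_seq sr =>
    let cs := sr.toList
    let st := (PySem.List.enumerate cs 0).foldl
      (fun (st : List (List Char) × Int) jc =>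
        let lastN := if jc.2 = 'N' then jc.1 else st.2
        ((if 6 ≤ jc.1 then
            st.1 ++ [if jc.1 - 6 ≤ lastN then ['n','u','l','l']
                     else PySem.List.slice cs (some (jc.1 - 6)) (some (jc.1 - 6 + 7))]
          else st.1), lastN)) ([], -1)
    word_seq ++ [String.ofList (PySem.Chars.join [' '] st.1)]) []

-- ===== PRECONDITION & SPEC =====
def Spec_sentence2word (str_set : List String) (out : List String) : Prop := out = sentence2word_alt str_set
instance (str_set : List String) (out : List String) : Decidable (Spec_sentence2word str_set out) := by unfold Spec_sentence2word; infer_instance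

-- ===== CLAIM (what is proved, stated in full; the proofs are below) =====
def Claim_equal_sentence2word : Prop := ∀ (str_set : List String), Dom_sentence2word str_set → Spec_sentence2word str_set (sentence2word str_set)

-- ===== LEMMAS AND PROOFS =====

-- the value A appends for window start i of cs
def pvFA (cs : List Char) (i : Int) : List Char :=
  if PySem.Chars.isIn ['N'] (PySem.List.slice cs (some i) (some (i + 7))) then ['n','u','l','l']
  else PySem.List.slice cs (some i) (some (i + 7))

-- index of the last 'N' in cs, or -1 (the value B's last_n has after the loop)
def pvLN (cs : List Char) : Int :=
  (PySem.List.enumerate cs 0).foldl (fun a jc => if jc.2 = 'N' then jc.1 else a) (-1)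

theorem pv_enumerate_snoc {α : Type} (l : List α) (x : α) (s : Int) :
    PySem.List.enumerate (l ++ [x]) s = PySem.List.enumerate l s ++ [((s + l.length : Int), x)] := by
  induction l generalizing s with
  | nil => simp [PySem.List.enumerate_nil, PySem.List.enumerate_cons]
  | cons a t ih =>
    simp only [List.cons_append, PySem.List.enumerate_cons, ih, List.length_cons]
    have he : s + 1 + (t.length : Int) = s + ((t.length : Int) + 1) := by ring
    push_cast
    rw [he]

theorem pvLN_snoc (l : List Char) (c : Char) :
    pvLN (l ++ [c]) = if c = 'N' then (l.length : Int) else pvLN l := by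
  unfold pvLN
  rw [pv_enumerate_snoc, List.foldl_append]
  simp

theorem pvLN_ge (l : List Char) (j : Nat) :
    ((j : Int) ≤ pvLN l) ↔ ∃ k, ∃ h : k < l.length, j ≤ k ∧ l[k] = 'N' := by
  induction l using List.reverseRecOn with
  | nil =>
    simp only [pvLN, PySem.List.enumerate_nil, List.foldl_nil, List.length_nil]
    constructor
    · intro h; omega
    · rintro ⟨k, hk, -⟩; omega
  | append_singleton l c ih =>
    rw [pvLN_snoc]
    by_cases hc : c = 'N'
    · subst hc
      rw [if_pos rfl]
      constructor
      · intro h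
        have hj : j ≤ l.length := by exact_mod_cast h
        refine ⟨l.length, by simp, hj, ?_⟩
        rw [List.getElem_append_right (Nat.le_refl _)]
        simp
      · rintro ⟨k, hk, hjk, -⟩
        have hk' : k < l.length + 1 := by simpa using hk
        have : j ≤ l.length := by omega
        exact_mod_cast Int.ofNat_le.mpr this
    · rw [if_neg hc, ih]
      constructor
      · rintro ⟨k, hk, hjk, hN⟩
        exact ⟨k, by simp; omega, hjk, by rw [List.getElem_append_left hk]; exact hN⟩
      · rintro ⟨k, hk, hjk, hN⟩
        have hk' : k < l.length + 1 := by simpa using hk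
        rcases Nat.lt_or_ge k l.length with h | h
        · refine ⟨k, h, hjk, ?_⟩
          rw [List.getElem_append_left h] at hN; exact hN
        · exfalso
          have hkl : k = l.length := by omega
          subst hkl
          rw [List.getElem_append_right (Nat.le_refl _)] at hN
          simp at hN
          exact hc hN

theorem pv_mem_take_drop (l : List Char) (j n : Nat) (x : Char) :
    x ∈ (l.drop j).take n ↔ ∃ k, ∃ h : k < l.length, j ≤ k ∧ k < j + n ∧ l[k] = x := by
  rw [List.mem_iff_getElem]
  constructor
  · rintro ⟨i, hi, hx⟩
    have hi' : i < n ∧ j + i < l.length := by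
      simp [List.length_take, List.length_drop] at hi; omega
    refine ⟨j + i, hi'.2, by omega, by omega, ?_⟩
    rw [List.getElem_take, List.getElem_drop] at hx
    exact hx
  · rintro ⟨k, hk, hjk, hkn, hx⟩
    refine ⟨k - j, by simp [List.length_take, List.length_drop]; omega, ?_⟩
    rw [List.getElem_take, List.getElem_drop]
    have : j + (k - j) = k := by omega
    simp_rw [this]
    exact hx

-- the per-window tests of A and B agree (B about the processed prefix, A about the full string)
theorem pv_cond_eq (cs0 l : List Char) (c : Char) (hp : (l ++ [c]) <+: cs0) (h6 : 6 ≤ l.length) :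
    (((l.length : Int) - 6 ≤ pvLN (l ++ [c]))
      ↔ PySem.Chars.isIn ['N'] (PySem.List.slice cs0 (some ((l.length : Int) - 6)) (some ((l.length : Int) - 6 + 7))) = true) := by
  set j : Nat := l.length - 6 with hj
  have hcast : ((l.length : Int) - 6) = (j : Int) := by omega
  have hlen : l.length + 1 ≤ cs0.length := by
    have := hp.length_le; simpa using this
  have hslice : PySem.List.slice cs0 (some ((l.length : Int) - 6)) (some ((l.length : Int) - 6 + 7))
      = (cs0.drop j).take 7 := by
    rw [hcast, PySem.List.slice_toNat _ (by omega) (by omega)]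
    have e1 : ((j : Int)).toNat = j := by omega
    have e2 : ((j : Int) + 7).toNat - j = 7 := by omega
    rw [e1, e2]
  rw [hslice, hcast, PySem.Chars.isIn_iff_infix]
  have hinfix : (['N'] <:+: (cs0.drop j).take 7) ↔ 'N' ∈ (cs0.drop j).take 7 := by
    constructor
    · intro h; exact h.mem (by simp)
    · intro h
      rcases List.mem_iff_append.mp h with ⟨s, t, hst⟩
      exact ⟨s, t, by simpa using hst.symm⟩
  rw [hinfix, pv_mem_take_drop, pvLN_ge]
  constructor
  · rintro ⟨k, hk, hjk, hN⟩
    have hk' : k < l.length + 1 := by simpa using hk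
    refine ⟨k, by omega, hjk, by omega, ?_⟩
    exact (hp.getElem hk).symm.trans hN
  · rintro ⟨k, hk, hjk, hk7, hN⟩
    have hk' : k < l.length + 1 := by omega
    refine ⟨k, by simpa using hk', hjk, ?_⟩
    exact (hp.getElem (by simpa using hk' : k < (l ++ [c]).length)).trans hN

-- loop invariant of B's single pass, relative to the full string cs0
theorem pv_inv (cs0 : List Char) (cs : List Char) (hp : cs <+: cs0) :
    (PySem.List.enumerate cs 0).foldl
      (fun (st : List (List Char) × Int) jc =>
        ((if 6 ≤ jc.1 then
            st.1 ++ [if jc.1 - 6 ≤ (if jc.2 = 'N' then jc.1 else st.2) then ['n','u','l','l']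
                     else PySem.List.slice cs0 (some (jc.1 - 6)) (some (jc.1 - 6 + 7))]
          else st.1), (if jc.2 = 'N' then jc.1 else st.2))) ([], -1)
    = ((PySem.List.pyRange 0 ((cs.length : Int) - 6) 1).map (pvFA cs0), pvLN cs) := by
  induction cs using List.reverseRecOn with
  | nil =>
    simp only [List.length_nil, Nat.cast_zero]
    rw [PySem.List.pyRange_one_eq_nil (by omega : (0:Int) - 6 ≤ 0)]
    simp [PySem.List.enumerate_nil, pvLN]
  | append_singleton l c ih =>
    have hp' : l <+: cs0 := (l.prefix_append [c]).trans hp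
    rw [pv_enumerate_snoc, List.foldl_append, ih hp']
    simp only [List.foldl_cons, List.foldl_nil, zero_add]
    have hln : (if c = 'N' then (l.length : Int) else pvLN l) = pvLN (l ++ [c]) :=
      (pvLN_snoc l c).symm
    rw [hln]
    by_cases h6 : 6 ≤ l.length
    · rw [if_pos (by exact_mod_cast h6)]
      have hrange : PySem.List.pyRange 0 (((l ++ [c]).length : Int) - 6) 1
          = PySem.List.pyRange 0 ((l.length : Int) - 6) 1 ++ [(l.length : Int) - 6] := by
        have he : ((l ++ [c]).length : Int) - 6 = ((l.length : Int) - 6) + 1 := by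
          simp; omega
        rw [he, PySem.List.pyRange_one_succ_right (by omega)]
      rw [hrange, List.map_append, List.map_singleton]
      congr 2
      unfold pvFA
      have hiff := pv_cond_eq cs0 l c hp h6
      by_cases hcond : ((l.length : Int) - 6 ≤ pvLN (l ++ [c]))
      · rw [if_pos hcond, if_pos (hiff.mp hcond)]
      · rw [if_neg hcond, if_neg (fun hb => hcond (hiff.mpr hb))]
    · rw [if_neg (by exact_mod_cast h6)]
      have e1 : PySem.List.pyRange 0 ((l.length : Int) - 6) 1 = [] :=
        PySem.List.pyRange_one_eq_nil (by omega)
      have e2 : PySem.List.pyRange 0 (((l ++ [c]).length : Int) - 6) 1 = [] :=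
        PySem.List.pyRange_one_eq_nil (by simp; omega)
      rw [e1, e2]

theorem pv_inner_eq (sr : String) :
    String.ofList (PySem.Chars.join [' ']
      ((PySem.List.pyRange 0 ((sr.toList.length : Int) - 6) 1).foldl
        (fun tmp i =>
          if PySem.Chars.isIn ['N'] (PySem.List.slice sr.toList (some i) (some (i + 7))) then
            tmp ++ [['n','u','l','l']]
          else
            tmp ++ [PySem.List.slice sr.toList (some i) (some (i + 7))]) []))
    = String.ofList (PySem.Chars.join [' ']
      ((PySem.List.enumerate sr.toList 0).foldl
        (fun (st : List (List Char) × Int) jc =>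
          ((if 6 ≤ jc.1 then
              st.1 ++ [if jc.1 - 6 ≤ (if jc.2 = 'N' then jc.1 else st.2) then ['n','u','l','l']
                       else PySem.List.slice sr.toList (some (jc.1 - 6)) (some (jc.1 - 6 + 7))]
            else st.1), (if jc.2 = 'N' then jc.1 else st.2))) ([], -1)).1) := by
  rw [pv_inv sr.toList sr.toList (List.prefix_refl _)]
  have hA : (PySem.List.pyRange 0 ((sr.toList.length : Int) - 6) 1).foldl
      (fun tmp i =>
        if PySem.Chars.isIn ['N'] (PySem.List.slice sr.toList (some i) (some (i + 7))) then
          tmp ++ [['n','u','l','l']]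
        else
          tmp ++ [PySem.List.slice sr.toList (some i) (some (i + 7))]) []
      = (PySem.List.pyRange 0 ((sr.toList.length : Int) - 6) 1).foldl
        (fun tmp i => tmp ++ [pvFA sr.toList i]) [] := by
    apply PySem.List.foldl_congr_mem
    intro acc x _
    unfold pvFA
    by_cases h : PySem.Chars.isIn ['N'] (PySem.List.slice sr.toList (some x) (some (x + 7))) = true
    · rw [if_pos h, if_pos h]
    · rw [if_neg h, if_neg h]
  rw [hA, PySem.List.foldl_append_singleton_eq_map]
  simp

-- ===== VERDICT (by name: the statement is the Claim_ definition above) =====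
theorem sentence2word_spec : Claim_equal_sentence2word := by
  intro str_set _
  unfold Spec_sentence2word sentence2word sentence2word_alt
  simp only []
  rw [PySem.List.foldl_append_singleton_eq_map, PySem.List.foldl_append_singleton_eq_map]
  simp only [List.nil_append]
  apply List.map_congr_left
  intro sr _
  exact pv_inner_eq sr
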